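-- pv_equiv track=rewrite | github.com/posl/comment_recommendation | script/split_gen/2_time/zh/257_D/1.py | solve
-- ===== SOURCE A (Python) =====
-- def solve(num, x, y, p):
--     ans = 0
--     for i in range(num):
--         for j in range(num):
--             if i == j:
--                 continue
--             if p[i] * ans >= abs(x[i] - x[j]) + abs(y[i] - y[j]):
--                 ans += 1
--                 break
--     return ans
-- ===== SOURCE B (Python) =====
-- def solve(num, x, y, p):
--     def nearest(i):
--         best = None
--         for j in range(num):
--             if j != i:
--                 dist = abs(x[i] - x[j]) + abs(y[i] - y[j])
--                 if best is None or dist < best: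
--                     best = dist
--         return best
--     d = [nearest(i) for i in range(num)]
--     ans = 0
--     for i in range(num):
--         if d[i] is not None and p[i] * ans >= d[i]:
--             ans += 1
--     return ans
-- ===== Notes on version B (the rewrite author's own statement) =====
-- stated objective: alternative
-- what changed: B precomputes each point's minimum L1 distance to any other point once, then decides the increments in a single sequential pass, instead of A's inner scan with an early break that re-reads the evolving counter inside the nested loop.
import Mathlib
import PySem

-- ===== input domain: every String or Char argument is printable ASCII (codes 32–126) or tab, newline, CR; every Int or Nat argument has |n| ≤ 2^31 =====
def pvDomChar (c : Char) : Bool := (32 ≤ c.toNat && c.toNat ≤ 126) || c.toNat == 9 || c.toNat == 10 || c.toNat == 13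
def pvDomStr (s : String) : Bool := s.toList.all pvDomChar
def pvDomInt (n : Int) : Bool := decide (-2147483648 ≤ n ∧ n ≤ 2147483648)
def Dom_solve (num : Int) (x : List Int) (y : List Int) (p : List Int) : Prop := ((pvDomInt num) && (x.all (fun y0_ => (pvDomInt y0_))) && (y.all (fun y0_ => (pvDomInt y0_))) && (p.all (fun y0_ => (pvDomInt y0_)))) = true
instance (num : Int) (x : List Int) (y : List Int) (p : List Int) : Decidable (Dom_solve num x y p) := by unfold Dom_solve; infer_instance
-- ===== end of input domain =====

-- B replaces A's nested scan (with an early break that reads the evolving counter) by a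
-- one-time precomputation of each point's minimum L1 distance to any other point followed
-- by a single sequential pass; objective: alternative decomposition, same asymptotic cost.

-- ===== PORT A =====
-- xs[i] under Pre_ (index in range); default never reached inside Pre_
def pvGetI (xs : List Int) (i : Int) : Int := PySem.List.pyGetD xs i 0

-- inner 'for j in range(num)' loop with continue/break, as structural recursion on the j-list
def solveInner (x : List Int) (y : List Int) (p : List Int) (i : Int) (ans : Int) : List Int → Int
  | [] => ans
  | j :: js =>
    if i = j then solveInner x y p i ans js
    else if pvGetI p i * ans ≥ |pvGetI x i - pvGetI x j| + |pvGetI y i - pvGetI y j| then ans + 1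
    else solveInner x y p i ans js

def solve (num : Int) (x : List Int) (y : List Int) (p : List Int) : Int :=
  (PySem.List.pyRange 0 num 1).foldl
    (fun ans i => solveInner x y p i ans (PySem.List.pyRange 0 num 1)) 0

-- ===== PORT B =====
-- one step of B's 'nearest' loop: fold None/min over j ≠ i
def minDistStep (x : List Int) (y : List Int) (i : Int) (best : Option Int) (j : Int) : Option Int :=
  if j ≠ i then
    let dist := |pvGetI x i - pvGetI x j| + |pvGetI y i - pvGetI y j|
    match best with
    | none => some dist
    | some b => if dist < b then some dist else some b
  else best

def solve_alt (num : Int) (x : List Int) (y : List Int) (p : List Int) : Int :=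
  let d := (PySem.List.pyRange 0 num 1).map
    (fun i => (PySem.List.pyRange 0 num 1).foldl (minDistStep x y i) none)
  (PySem.List.pyRange 0 num 1).foldl
    (fun ans i =>
      match PySem.List.pyGetD d i none with
      | none => ans
      | some v => if pvGetI p i * ans ≥ v then ans + 1 else ans) 0

-- ===== PRECONDITION & SPEC =====
-- A raises IndexError when num exceeds the length of x, y or p; exactly those inputs are excluded.
def Pre_solve (num : Int) (x : List Int) (y : List Int) (p : List Int) : Prop :=
  num ≤ (x.length : Int) ∧ num ≤ (y.length : Int) ∧ num ≤ (p.length : Int)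
instance (num : Int) (x : List Int) (y : List Int) (p : List Int) : Decidable (Pre_solve num x y p) := by unfold Pre_solve; infer_instance

def pvWitness_solve : Int × List Int × List Int × List Int := (2, [0, 3], [0, 0], [1, 2])

def Spec_solve (num : Int) (x : List Int) (y : List Int) (p : List Int) (out : Int) : Prop := out = solve_alt num x y p
instance (num : Int) (x : List Int) (y : List Int) (p : List Int) (out : Int) : Decidable (Spec_solve num x y p out) := by unfold Spec_solve; infer_instance

-- ===== CLAIM (what is proved, stated in full; the proofs are below) =====
def Claim_equal_solve : Prop := ∀ (num : Int) (x : List Int) (y : List Int) (p : List Int), Dom_solve num x y p → Pre_solve num x y p → Spec_solve num x y p (solve num x y p)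

-- ===== LEMMAS AND PROOFS =====

-- folding min from 'some b' yields 'some m' with m ≤ b
theorem minDistStep_le (x y : List Int) (i : Int) :
    ∀ (js : List Int) (b : Int), ∃ m, js.foldl (minDistStep x y i) (some b) = some m ∧ m ≤ b := by
  intro js
  induction js with
  | nil => intro b; exact ⟨b, rfl, le_refl b⟩
  | cons j js ih =>
    intro b
    rw [List.foldl_cons]
    by_cases hj : j ≠ i
    · have hstep : minDistStep x y i (some b) j =
          if |pvGetI x i - pvGetI x j| + |pvGetI y i - pvGetI y j| < b
          then some (|pvGetI x i - pvGetI x j| + |pvGetI y i - pvGetI y j|) else some b := by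
        simp [minDistStep, hj]
      rw [hstep]
      by_cases hd : |pvGetI x i - pvGetI x j| + |pvGetI y i - pvGetI y j| < b
      · rw [if_pos hd]
        obtain ⟨m, hm, hle⟩ := ih (|pvGetI x i - pvGetI x j| + |pvGetI y i - pvGetI y j|)
        exact ⟨m, hm, hle.trans hd.le⟩
      · rw [if_neg hd]; exact ih b
    · have hstep : minDistStep x y i (some b) j = some b := by
        simp [minDistStep, hj]
      rw [hstep]; exact ih b

-- A's inner break-loop computes the same increment as comparing against the folded minimum,
-- provided every previously seen candidate (the accumulator) already failed the test
theorem inner_eq_min (x y p : List Int) (i : Int) :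
    ∀ (js : List Int) (best : Option Int) (ans : Int),
      (∀ b, best = some b → pvGetI p i * ans < b) →
      solveInner x y p i ans js =
        (match js.foldl (minDistStep x y i) best with
         | none => ans
         | some m => if pvGetI p i * ans ≥ m then ans + 1 else ans) := by
  intro js
  induction js with
  | nil =>
    intro best ans hbest
    cases best with
    | none => rfl
    | some b =>
      have := hbest b rfl
      show ans = if pvGetI p i * ans ≥ b then ans + 1 else ans
      rw [if_neg (by omega)]
  | cons j js ih =>
    intro best ans hbest
    simp only [solveInner, List.foldl_cons, minDistStep]
    by_cases hij : i = j
    · rw [if_pos hij, if_neg (by simpa using hij.symm)]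
      exact ih best ans hbest
    · rw [if_neg hij, if_pos (fun h => hij h.symm)]
      set D := |pvGetI x i - pvGetI x j| + |pvGetI y i - pvGetI y j| with hD
      by_cases hc : pvGetI p i * ans ≥ D
      · rw [if_pos hc]
        -- the new accumulator is some m' with m' ≤ D, so the folded min is ≤ D ≤ threshold
        have step : ∃ m', (match best with
            | none => some D
            | some b => if D < b then some D else some b) = some m' ∧ m' ≤ D := by
          cases best with
          | none => exact ⟨D, rfl, le_refl D⟩
          | some b =>
            by_cases hdb : D < b
            · exact ⟨D, by simp [hdb], le_refl D⟩
            · exact ⟨b, by simp [hdb], by omega⟩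
        obtain ⟨m', hm', hle'⟩ := step
        rw [hm']
        obtain ⟨m, hm, hle⟩ := minDistStep_le x y i js m'
        rw [hm]
        show ans + 1 = if pvGetI p i * ans ≥ m then ans + 1 else ans
        rw [if_pos (by omega)]
      · rw [if_neg hc]
        have hbest' : ∀ b, (match best with
            | none => some D
            | some b0 => if D < b0 then some D else some b0) = some b → pvGetI p i * ans < b := by
          intro b hb
          cases best with
          | none => simp at hb; omega
          | some b0 =>
            by_cases hdb : D < b0
            · simp [hdb] at hb; omega
            · simp [hdb] at hb; have := hbest b0 rfl; omega
        cases best with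
        | none => exact ih _ ans hbest'
        | some b0 => exact ih _ ans hbest'

theorem solve_eq_alt (num : Int) (x : List Int) (y : List Int) (p : List Int) :
    solve num x y p = solve_alt num x y p := by
  have h : ∀ (ans : Int), ∀ i ∈ PySem.List.pyRange 0 num 1,
      solveInner x y p i ans (PySem.List.pyRange 0 num 1) =
        (match PySem.List.pyGetD
            ((PySem.List.pyRange 0 num 1).map
              (fun i => (PySem.List.pyRange 0 num 1).foldl (minDistStep x y i) none)) i none with
         | none => ans
         | some v => if pvGetI p i * ans ≥ v then ans + 1 else ans) := by
    intro ans i hi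
    have hmem := (PySem.List.mem_pyRange_one).mp hi
    rw [PySem.List.pyGetD_map_pyRange_of_nonneg _ num i none hmem.1 hmem.2]
    exact inner_eq_min x y p i (PySem.List.pyRange 0 num 1) none ans (by intro b hb; cases hb)
  exact PySem.List.foldl_congr_mem _ _ _ _ h

-- ===== VERDICT (by name: the statement is the Claim_ definition above) =====
theorem solve_spec : Claim_equal_solve := by
  intro num x y p _ _
  exact solve_eq_alt num x y p
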